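-- pv_equiv track=rewrite | github.com/nbratek/WDI | zestaw 2/zad12.py | f
-- ===== SOURCE A (Python) =====
-- def liczba_cyfr(x):
--     licznik = 0
--     while x >0:
--         licznik += 1
--         x //= 10
--     return licznik
--
-- def f(x):
--     l = liczba_cyfr(x)
--     while x > 0:
--         y = x % 10
--         if y != l:
--             x //= 10
--         else:
--             return True
--     return False
-- ===== SOURCE B (Python) =====
-- def f(x):
--     if x <= 0:
--         return False
--     s = str(x)
--     n = len(s)
--     return any(int(d) == n for d in s)
-- ===== Notes on version B (the rewrite author's own statement) =====
-- stated objective: idiomatic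
-- what changed: Replaces the two arithmetic mod/floordiv digit loops with the string representation: n = len(str(x)) and any(int(d) == n for d in str(x)), with a non-positive guard matching A's False there.
import Mathlib
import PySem

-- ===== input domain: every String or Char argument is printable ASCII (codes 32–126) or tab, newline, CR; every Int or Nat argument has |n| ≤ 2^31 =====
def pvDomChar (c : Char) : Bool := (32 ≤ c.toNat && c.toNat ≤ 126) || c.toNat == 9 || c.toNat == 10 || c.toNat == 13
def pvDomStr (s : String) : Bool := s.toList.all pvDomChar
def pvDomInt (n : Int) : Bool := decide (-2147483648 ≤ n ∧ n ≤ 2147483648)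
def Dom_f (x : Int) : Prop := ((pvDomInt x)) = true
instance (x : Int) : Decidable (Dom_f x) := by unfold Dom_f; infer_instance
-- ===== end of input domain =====

-- B tests the digit count by traversing str(x) (len + any) instead of A's two
-- arithmetic mod/floordiv loops; objective: idiomatic. Same behaviour on all ints.

-- termination helper for the ports' while-loops (x //= 10 shrinks x.toNat)
lemma pvFdiv10_toNat_lt (x : Int) (h : 0 < x) : (PySem.Int.floordiv x 10).toNat < x.toNat := by
  unfold PySem.Int.floordiv
  rw [Int.fdiv_eq_ediv_of_nonneg x (by norm_num)]
  omega

-- ===== PORT A =====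
def liczbaCyfrGo (x licznik : Int) : Int :=
  if _h : 0 < x then
    liczbaCyfrGo (PySem.Int.floordiv x 10) (licznik + 1)
  else licznik
termination_by x.toNat
decreasing_by exact pvFdiv10_toNat_lt _ _h

def liczbaCyfr (x : Int) : Int := liczbaCyfrGo x 0

def fGo (x l : Int) : Bool :=
  if _h : 0 < x then
    if PySem.Int.mod x 10 ≠ l then fGo (PySem.Int.floordiv x 10) l
    else true
  else false
termination_by x.toNat
decreasing_by exact pvFdiv10_toNat_lt _ _h

def f (x : Int) : Bool := fGo x (liczbaCyfr x)

-- ===== PORT B =====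
def f_alt (x : Int) : Bool :=
  if x ≤ 0 then false
  else
    let s := PySem.Int.toStr x
    let n := PySem.Str.len s
    s.toList.any (fun d => PySem.Int.ofChars? [d] == some n)

-- ===== PRECONDITION & SPEC =====
def Spec_f (x : Int) (out : Bool) : Prop := out = f_alt x
instance (x : Int) (out : Bool) : Decidable (Spec_f x out) := by unfold Spec_f; infer_instance

-- ===== CLAIM (what is proved, stated in full; the proofs are below) =====
def Claim_equal_f : Prop := ∀ (x : Int), Dom_f x → Spec_f x (f x)

-- ===== LEMMAS AND PROOFS =====

-- A's first loop counts the decimal digits of x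
lemma liczbaCyfrGo_eq (m : ℕ) : ∀ (x k : Int), x.toNat = m →
    liczbaCyfrGo x k = k + ((Nat.digits 10 x.toNat).length : Int) := by
  induction m using Nat.strong_induction_on with
  | _ m ih =>
    intro x k hm
    rw [liczbaCyfrGo]
    split_ifs with h
    · have hx10 : PySem.Int.floordiv x 10 = x / 10 := by
        unfold PySem.Int.floordiv; exact Int.fdiv_eq_ediv_of_nonneg x (by norm_num)
      have hlt : (PySem.Int.floordiv x 10).toNat < m := hm ▸ pvFdiv10_toNat_lt x h
      rw [ih _ hlt _ _ rfl]
      have hdig : Nat.digits 10 x.toNat = x.toNat % 10 :: Nat.digits 10 (x.toNat / 10) := by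
        exact Nat.digits_def' (by norm_num) (by omega)
      have : (PySem.Int.floordiv x 10).toNat = x.toNat / 10 := by rw [hx10]; omega
      rw [this, hdig]
      simp; ring
    · have : x.toNat = 0 := by omega
      simp [this]

-- A's second loop: does some decimal digit of x equal l?
lemma fGo_eq (m : ℕ) : ∀ (x l : Int), x.toNat = m →
    fGo x l = (Nat.digits 10 x.toNat).any (fun d => (d : Int) == l) := by
  induction m using Nat.strong_induction_on with
  | _ m ih =>
    intro x l hm
    rw [fGo]
    split_ifs with h hne
    · -- 0 < x, current digit ≠ l: recurse
      have hx10 : PySem.Int.floordiv x 10 = x / 10 := by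
        unfold PySem.Int.floordiv; exact Int.fdiv_eq_ediv_of_nonneg x (by norm_num)
      have hmod : PySem.Int.mod x 10 = ((x.toNat % 10 : ℕ) : Int) := by
        unfold PySem.Int.mod; rw [Int.fmod_eq_emod]; simp; omega
      have hdig : Nat.digits 10 x.toNat = x.toNat % 10 :: Nat.digits 10 (x.toNat / 10) := by
        exact Nat.digits_def' (by norm_num) (by omega)
      have hq : (PySem.Int.floordiv x 10).toNat = x.toNat / 10 := by rw [hx10]; omega
      have hlt : (PySem.Int.floordiv x 10).toNat < m := hm ▸ pvFdiv10_toNat_lt x h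
      rw [ih _ hlt _ l rfl, hq, hdig, List.any_cons]
      have hb : ((((x.toNat % 10 : ℕ) : Int)) == l) = false := by
        simp only [beq_eq_false_iff_ne, ne_eq]; rw [← hmod]; exact hne
      rw [hb, Bool.false_or]
    · -- 0 < x, current digit = l: found
      have hmod : PySem.Int.mod x 10 = ((x.toNat % 10 : ℕ) : Int) := by
        unfold PySem.Int.mod; rw [Int.fmod_eq_emod]; simp; omega
      have hdig : Nat.digits 10 x.toNat = x.toNat % 10 :: Nat.digits 10 (x.toNat / 10) := by
        exact Nat.digits_def' (by norm_num) (by omega)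
      have heq : ((x.toNat % 10 : ℕ) : Int) = l := by rw [← hmod]; omega
      have hb : ((((x.toNat % 10 : ℕ) : Int)) == l) = true := by
        simp only [beq_iff_eq]; exact heq
      rw [hdig, List.any_cons, hb, Bool.true_or]
    · -- x ≤ 0: no digits
      have : x.toNat = 0 := by omega
      simp [this]

-- core's toDigitsCore, characterised by Nat.digits
lemma toDigitsCore_eq (fuel : ℕ) : ∀ (n : ℕ) (acc : List Char), n < fuel →
    Nat.toDigitsCore 10 fuel n acc =
      (if n = 0 then '0' :: acc else ((Nat.digits 10 n).map Nat.digitChar).reverse ++ acc) := by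
  induction fuel with
  | zero => intro n acc h; omega
  | succ fuel ih =>
    intro n acc h
    rw [Nat.toDigitsCore]
    by_cases h0 : n = 0
    · simp [h0, Nat.digitChar]
    · have hdig : Nat.digits 10 n = n % 10 :: Nat.digits 10 (n / 10) := by
        exact Nat.digits_def' (by norm_num) (by omega)
      by_cases hq : n / 10 = 0
      · have : Nat.digits 10 (n / 10) = [] := by rw [hq]; simp
        simp only [hq]
        simp [h0, hdig, this]
      · simp only [if_neg hq]
        rw [ih (n / 10) _ (by omega)]
        simp [hq, h0, hdig]

-- each digit char parses back to the digit
lemma ofChars_digitChar (d : ℕ) (h : d < 10) :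
    PySem.Int.ofChars? [Nat.digitChar d] = some (d : Int) := by
  interval_cases d <;> decide

lemma any_parse (L : Int) : ∀ (ds : List ℕ), (∀ d ∈ ds, d < 10) →
    ((ds.map Nat.digitChar).any (fun c => PySem.Int.ofChars? [c] == some L))
      = ds.any (fun d => (d : Int) == L) := by
  intro ds
  induction ds with
  | nil => intro _; rfl
  | cons d t ih =>
    intro hlt
    simp only [List.map_cons, List.any_cons, ofChars_digitChar d (hlt d (by simp))]
    rw [ih (fun e he => hlt e (by simp [he]))]
    simp

-- ===== VERDICT (by name: the statement is the Claim_ definition above) =====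
theorem f_spec : Claim_equal_f := by
  intro x _
  unfold Spec_f f_alt f liczbaCyfr
  by_cases hx : x ≤ 0
  · rw [fGo]
    simp [hx, show ¬ (0 < x) by omega]
  · have hpos : 0 < x := by omega
    have hn0 : x.toNat ≠ 0 := by omega
    have htc : PySem.Int.toChars x = ((Nat.digits 10 x.toNat).map Nat.digitChar).reverse := by
      unfold PySem.Int.toChars Nat.toDigits
      rw [if_neg (by omega), toDigitsCore_eq _ _ _ (by omega), if_neg hn0]
      simp
    have hlist : (PySem.Int.toStr x).toList = ((Nat.digits 10 x.toNat).map Nat.digitChar).reverse := by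
      rw [PySem.Int.toList_toStr, htc]
    have hlen : PySem.Str.len (PySem.Int.toStr x) = ((Nat.digits 10 x.toNat).length : Int) := by
      unfold PySem.Str.len
      rw [hlist]; simp
    simp only [if_neg hx, hlist, hlen, List.any_reverse]
    rw [any_parse _ _ (fun d hd => Nat.digits_lt_base (by norm_num) hd)]
    rw [fGo_eq x.toNat x _ rfl, liczbaCyfrGo_eq x.toNat x 0 rfl]
    simp
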